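-- pv_equiv track=rewrite | github.com/schollz/livecodingmusic | livecoding.py | get_note
-- ===== SOURCE A (Python) =====
-- db_notes = [
--     ["C", "B#", "Bs"],
--     ["Db", "C#", "Cs"],
--     ["D"],
--     ["Eb", "D#", "Ds"],
--     ["E", "Fb"],
--     ["F", "E#", "Es"],
--     ["F#", "Gb", "Fs"],
--     ["G"],
--     ["G#", "Ab", "Gs"],
--     ["A"],
--     ["A#", "Bb", "As"],
--     ["B", "Cb"],
-- ]
--
-- def get_note(s):
--     note_name = ""
--     note_index = 0
--     longest = 0
--     for i, notes in enumerate(db_notes):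
--         for _, note in enumerate(notes):
--             if len(note) < longest:
--                 continue
--             if s.startswith(note):
--                 longest = len(note)
--                 note_name = note
--                 note_index = i
--     if longest == 0:
--         raise ValueError
--     return note_name, note_index
-- ===== SOURCE B (Python) =====
-- db_notes = [
--     ["C", "B#", "Bs"],
--     ["Db", "C#", "Cs"],
--     ["D"],
--     ["Eb", "D#", "Ds"],
--     ["E", "Fb"],
--     ["F", "E#", "Es"],
--     ["F#", "Gb", "Fs"],
--     ["G"],
--     ["G#", "Ab", "Gs"],
--     ["A"],
--     ["A#", "Bb", "As"],
--     ["B", "Cb"],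
-- ]
--
-- _lookup = {note: i for i, notes in enumerate(db_notes) for note in notes}
--
-- def get_note(s):
--     for length in (2, 1):
--         prefix = s[:length]
--         if prefix in _lookup:
--             return prefix, _lookup[prefix]
--     raise ValueError
-- ===== Notes on version B (the rewrite author's own statement) =====
-- stated objective: idiomatic
-- what changed: Replaced A's nested scan over the whole note table (tracking the longest match seen so far) by a note-to-index dictionary built once at module load and probed longest-first with the fixed-length prefixes s[:2] then s[:1].
import Mathlib
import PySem

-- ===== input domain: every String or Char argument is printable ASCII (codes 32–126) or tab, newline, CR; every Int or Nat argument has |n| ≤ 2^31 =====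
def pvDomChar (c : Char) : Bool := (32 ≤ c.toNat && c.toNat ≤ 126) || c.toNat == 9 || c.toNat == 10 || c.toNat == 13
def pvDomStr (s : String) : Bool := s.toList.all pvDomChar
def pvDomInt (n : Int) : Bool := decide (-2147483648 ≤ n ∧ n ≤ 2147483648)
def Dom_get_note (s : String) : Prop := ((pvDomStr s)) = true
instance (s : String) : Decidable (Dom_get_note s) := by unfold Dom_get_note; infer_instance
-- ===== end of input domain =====

-- B replaces A's nested scan over the note table (tracking the longest match) by a
-- note→index dictionary built once and probed longest-first (s[:2], then s[:1]): idiomatic, same result.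
set_option maxRecDepth 4096

-- ===== PORT A =====
def db_notes : List (List String) := [
  ["C", "B#", "Bs"], ["Db", "C#", "Cs"], ["D"], ["Eb", "D#", "Ds"],
  ["E", "Fb"], ["F", "E#", "Es"], ["F#", "Gb", "Fs"], ["G"],
  ["G#", "Ab", "Gs"], ["A"], ["A#", "Bb", "As"], ["B", "Cb"]]

def get_note (s : String) : String × Int :=
  let st := (PySem.List.enumerate db_notes 0).foldl
    (fun (acc : String × Int × Int) (p : Int × List String) =>
      (PySem.List.enumerate p.2 0).foldl
        (fun (acc : String × Int × Int) (q : Int × String) =>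
          if PySem.Str.len q.2 < acc.2.2 then acc
          else if PySem.Str.startswith s q.2 then (q.2, p.1, PySem.Str.len q.2)
          else acc) acc)
    ("", 0, 0)
  -- 'if longest == 0: raise ValueError' — exactly the inputs excluded by Pre_get_note
  (st.1, st.2.1)

-- ===== PORT B =====
def note_lookup : PySem.Dict String Int :=
  (PySem.List.enumerate db_notes 0).foldl
    (fun d p => p.2.foldl (fun d note => d.insert note p.1) d)
    PySem.Dict.empty

def get_note_alt (s : String) : String × Int :=
  -- for length in (2, 1): probe the longest prefix first
  let p2 := PySem.Str.slice s none (some 2)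
  match note_lookup.get? p2 with
  | some i => (p2, i)
  | none =>
    let p1 := PySem.Str.slice s none (some 1)
    match note_lookup.get? p1 with
    | some i => (p1, i)
    | none => ("", 0)  -- 'raise ValueError' — excluded by Pre_get_note

-- ===== PRECONDITION & SPEC =====
-- Pre_ excludes exactly the inputs on which A raises ValueError (no note name is a
-- prefix of s, i.e. s does not start with one of the letters A–G): both Pythons raise there.
def Pre_get_note (s : String) : Prop :=
  s.toList.head? ∈ [some 'A', some 'B', some 'C', some 'D', some 'E', some 'F', some 'G']
instance (s : String) : Decidable (Pre_get_note s) := by unfold Pre_get_note; infer_instance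

def pvWitness_get_note : String := "C#9"

def Spec_get_note (s : String) (out : String × Int) : Prop := out = get_note_alt s
instance (s : String) (out : String × Int) : Decidable (Spec_get_note s out) := by unfold Spec_get_note; infer_instance

-- ===== CLAIM (what is proved, stated in full; the proofs are below) =====
def Claim_equal_get_note : Prop := ∀ (s : String), Dom_get_note s → Pre_get_note s → Spec_get_note s (get_note s)

-- ===== LEMMAS AND PROOFS =====

theorem lit_eq_ofList (l : List Char) (s : String) : (s = String.ofList l) ↔ s.toList = l := by
  constructor
  · intro h; rw [h]; simp
  · intro h; rw [← h]; simp

theorem note_lookup_eq : note_lookup = PySem.Dict.mk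
  [("C",0),("B#",0),("Bs",0),("Db",1),("C#",1),("Cs",1),("D",2),("Eb",3),("D#",3),("Ds",3),
   ("E",4),("Fb",4),("F",5),("E#",5),("Es",5),("F#",6),("Gb",6),("Fs",6),("G",7),
   ("G#",8),("Ab",8),("Gs",8),("A",9),("A#",10),("Bb",10),("As",10),("B",11),("Cb",11)] := by rfl

theorem slice_take2 (c d : Char) (r : List Char) :
    PySem.Str.slice (String.ofList (c::d::r)) none (some 2) = String.ofList [c,d] := by
  simp [PySem.Str.slice, PySem.List.slice_to]

theorem slice_take1 (c d : Char) (r : List Char) :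
    PySem.Str.slice (String.ofList (c::d::r)) none (some 1) = String.ofList [c] := by
  simp [PySem.Str.slice, PySem.List.slice_to]

-- the single-letter case: both ports agree on every one-character string A–G
theorem eq_single (c : Char) (hc : c ∈ ['A','B','C','D','E','F','G']) :
    get_note (String.ofList [c]) = get_note_alt (String.ofList [c]) := by
  fin_cases hc <;> decide

set_option maxHeartbeats 3000000 in
-- the two-or-more-character case
theorem eq_cons2 (c d : Char) (r : List Char) (hc : c ∈ ['A','B','C','D','E','F','G']) :
    get_note (String.ofList (c::d::r)) = get_note_alt (String.ofList (c::d::r)) := by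
  by_cases hb : d = '#' ∨ d = 'b' ∨ d = 's'
  · rcases hb with rfl | rfl | rfl <;> fin_cases hc <;>
      simp [get_note, get_note_alt, db_notes, PySem.List.enumerate,
        PySem.Str.startswith, PySem.Chars.startswith, List.isPrefixOf,
        slice_take2, slice_take1, note_lookup_eq,
        PySem.Dict.get?_mk_cons, PySem.Dict.get?, Bool.beq_eq_decide_eq, lit_eq_ofList,
        show ("C" : String).length = 1 from rfl,
        show ("B#" : String).length = 2 from rfl,
        show ("Bs" : String).length = 2 from rfl,
        show ("Db" : String).length = 2 from rfl,
        show ("C#" : String).length = 2 from rfl,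
        show ("Cs" : String).length = 2 from rfl,
        show ("D" : String).length = 1 from rfl,
        show ("Eb" : String).length = 2 from rfl,
        show ("D#" : String).length = 2 from rfl,
        show ("Ds" : String).length = 2 from rfl,
        show ("E" : String).length = 1 from rfl,
        show ("Fb" : String).length = 2 from rfl,
        show ("F" : String).length = 1 from rfl,
        show ("E#" : String).length = 2 from rfl,
        show ("Es" : String).length = 2 from rfl,
        show ("F#" : String).length = 2 from rfl,
        show ("Gb" : String).length = 2 from rfl,
        show ("Fs" : String).length = 2 from rfl,
        show ("G" : String).length = 1 from rfl,
        show ("G#" : String).length = 2 from rfl,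
        show ("Ab" : String).length = 2 from rfl,
        show ("Gs" : String).length = 2 from rfl,
        show ("A" : String).length = 1 from rfl,
        show ("A#" : String).length = 2 from rfl,
        show ("Bb" : String).length = 2 from rfl,
        show ("As" : String).length = 2 from rfl,
        show ("B" : String).length = 1 from rfl,
        show ("Cb" : String).length = 2 from rfl,
        show PySem.Str.len "C" = 1 from rfl,
        show PySem.Str.len "B#" = 2 from rfl,
        show PySem.Str.len "Bs" = 2 from rfl,
        show PySem.Str.len "Db" = 2 from rfl,
        show PySem.Str.len "C#" = 2 from rfl,
        show PySem.Str.len "Cs" = 2 from rfl,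
        show PySem.Str.len "D" = 1 from rfl,
        show PySem.Str.len "Eb" = 2 from rfl,
        show PySem.Str.len "D#" = 2 from rfl,
        show PySem.Str.len "Ds" = 2 from rfl,
        show PySem.Str.len "E" = 1 from rfl,
        show PySem.Str.len "Fb" = 2 from rfl,
        show PySem.Str.len "F" = 1 from rfl,
        show PySem.Str.len "E#" = 2 from rfl,
        show PySem.Str.len "Es" = 2 from rfl,
        show PySem.Str.len "F#" = 2 from rfl,
        show PySem.Str.len "Gb" = 2 from rfl,
        show PySem.Str.len "Fs" = 2 from rfl,
        show PySem.Str.len "G" = 1 from rfl,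
        show PySem.Str.len "G#" = 2 from rfl,
        show PySem.Str.len "Ab" = 2 from rfl,
        show PySem.Str.len "Gs" = 2 from rfl,
        show PySem.Str.len "A" = 1 from rfl,
        show PySem.Str.len "A#" = 2 from rfl,
        show PySem.Str.len "Bb" = 2 from rfl,
        show PySem.Str.len "As" = 2 from rfl,
        show PySem.Str.len "B" = 1 from rfl,
        show PySem.Str.len "Cb" = 2 from rfl,
        show String.ofList ['C'] = "C" from rfl,
        show String.ofList ['B', '#'] = "B#" from rfl,
        show String.ofList ['B', 's'] = "Bs" from rfl,
        show String.ofList ['D', 'b'] = "Db" from rfl,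
        show String.ofList ['C', '#'] = "C#" from rfl,
        show String.ofList ['C', 's'] = "Cs" from rfl,
        show String.ofList ['D'] = "D" from rfl,
        show String.ofList ['E', 'b'] = "Eb" from rfl,
        show String.ofList ['D', '#'] = "D#" from rfl,
        show String.ofList ['D', 's'] = "Ds" from rfl,
        show String.ofList ['E'] = "E" from rfl,
        show String.ofList ['F', 'b'] = "Fb" from rfl,
        show String.ofList ['F'] = "F" from rfl,
        show String.ofList ['E', '#'] = "E#" from rfl,
        show String.ofList ['E', 's'] = "Es" from rfl,
        show String.ofList ['F', '#'] = "F#" from rfl,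
        show String.ofList ['G', 'b'] = "Gb" from rfl,
        show String.ofList ['F', 's'] = "Fs" from rfl,
        show String.ofList ['G'] = "G" from rfl,
        show String.ofList ['G', '#'] = "G#" from rfl,
        show String.ofList ['A', 'b'] = "Ab" from rfl,
        show String.ofList ['G', 's'] = "Gs" from rfl,
        show String.ofList ['A'] = "A" from rfl,
        show String.ofList ['A', '#'] = "A#" from rfl,
        show String.ofList ['B', 'b'] = "Bb" from rfl,
        show String.ofList ['A', 's'] = "As" from rfl,
        show String.ofList ['B'] = "B" from rfl,
        show String.ofList ['C', 'b'] = "Cb" from rfl]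
  · have h1 : d ≠ '#' := fun h => hb (Or.inl h)
    have h2 : d ≠ 'b' := fun h => hb (Or.inr (Or.inl h))
    have h3 : d ≠ 's' := fun h => hb (Or.inr (Or.inr h))
    fin_cases hc <;>
      simp [get_note, get_note_alt, db_notes, PySem.List.enumerate,
        PySem.Str.startswith, PySem.Chars.startswith, List.isPrefixOf,
        slice_take2, slice_take1, note_lookup_eq,
        PySem.Dict.get?_mk_cons, PySem.Dict.get?, Bool.beq_eq_decide_eq, lit_eq_ofList,
        show ("C" : String).length = 1 from rfl,
        show ("B#" : String).length = 2 from rfl,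
        show ("Bs" : String).length = 2 from rfl,
        show ("Db" : String).length = 2 from rfl,
        show ("C#" : String).length = 2 from rfl,
        show ("Cs" : String).length = 2 from rfl,
        show ("D" : String).length = 1 from rfl,
        show ("Eb" : String).length = 2 from rfl,
        show ("D#" : String).length = 2 from rfl,
        show ("Ds" : String).length = 2 from rfl,
        show ("E" : String).length = 1 from rfl,
        show ("Fb" : String).length = 2 from rfl,
        show ("F" : String).length = 1 from rfl,
        show ("E#" : String).length = 2 from rfl,
        show ("Es" : String).length = 2 from rfl,
        show ("F#" : String).length = 2 from rfl,
        show ("Gb" : String).length = 2 from rfl,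
        show ("Fs" : String).length = 2 from rfl,
        show ("G" : String).length = 1 from rfl,
        show ("G#" : String).length = 2 from rfl,
        show ("Ab" : String).length = 2 from rfl,
        show ("Gs" : String).length = 2 from rfl,
        show ("A" : String).length = 1 from rfl,
        show ("A#" : String).length = 2 from rfl,
        show ("Bb" : String).length = 2 from rfl,
        show ("As" : String).length = 2 from rfl,
        show ("B" : String).length = 1 from rfl,
        show ("Cb" : String).length = 2 from rfl,
        show PySem.Str.len "C" = 1 from rfl,
        show PySem.Str.len "B#" = 2 from rfl,
        show PySem.Str.len "Bs" = 2 from rfl,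
        show PySem.Str.len "Db" = 2 from rfl,
        show PySem.Str.len "C#" = 2 from rfl,
        show PySem.Str.len "Cs" = 2 from rfl,
        show PySem.Str.len "D" = 1 from rfl,
        show PySem.Str.len "Eb" = 2 from rfl,
        show PySem.Str.len "D#" = 2 from rfl,
        show PySem.Str.len "Ds" = 2 from rfl,
        show PySem.Str.len "E" = 1 from rfl,
        show PySem.Str.len "Fb" = 2 from rfl,
        show PySem.Str.len "F" = 1 from rfl,
        show PySem.Str.len "E#" = 2 from rfl,
        show PySem.Str.len "Es" = 2 from rfl,
        show PySem.Str.len "F#" = 2 from rfl,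
        show PySem.Str.len "Gb" = 2 from rfl,
        show PySem.Str.len "Fs" = 2 from rfl,
        show PySem.Str.len "G" = 1 from rfl,
        show PySem.Str.len "G#" = 2 from rfl,
        show PySem.Str.len "Ab" = 2 from rfl,
        show PySem.Str.len "Gs" = 2 from rfl,
        show PySem.Str.len "A" = 1 from rfl,
        show PySem.Str.len "A#" = 2 from rfl,
        show PySem.Str.len "Bb" = 2 from rfl,
        show PySem.Str.len "As" = 2 from rfl,
        show PySem.Str.len "B" = 1 from rfl,
        show PySem.Str.len "Cb" = 2 from rfl,
        show String.ofList ['C'] = "C" from rfl,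
        show String.ofList ['B', '#'] = "B#" from rfl,
        show String.ofList ['B', 's'] = "Bs" from rfl,
        show String.ofList ['D', 'b'] = "Db" from rfl,
        show String.ofList ['C', '#'] = "C#" from rfl,
        show String.ofList ['C', 's'] = "Cs" from rfl,
        show String.ofList ['D'] = "D" from rfl,
        show String.ofList ['E', 'b'] = "Eb" from rfl,
        show String.ofList ['D', '#'] = "D#" from rfl,
        show String.ofList ['D', 's'] = "Ds" from rfl,
        show String.ofList ['E'] = "E" from rfl,
        show String.ofList ['F', 'b'] = "Fb" from rfl,
        show String.ofList ['F'] = "F" from rfl,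
        show String.ofList ['E', '#'] = "E#" from rfl,
        show String.ofList ['E', 's'] = "Es" from rfl,
        show String.ofList ['F', '#'] = "F#" from rfl,
        show String.ofList ['G', 'b'] = "Gb" from rfl,
        show String.ofList ['F', 's'] = "Fs" from rfl,
        show String.ofList ['G'] = "G" from rfl,
        show String.ofList ['G', '#'] = "G#" from rfl,
        show String.ofList ['A', 'b'] = "Ab" from rfl,
        show String.ofList ['G', 's'] = "Gs" from rfl,
        show String.ofList ['A'] = "A" from rfl,
        show String.ofList ['A', '#'] = "A#" from rfl,
        show String.ofList ['B', 'b'] = "Bb" from rfl,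
        show String.ofList ['A', 's'] = "As" from rfl,
        show String.ofList ['B'] = "B" from rfl,
        show String.ofList ['C', 'b'] = "Cb" from rfl,
        h1, h2, h3, Ne.symm h1, Ne.symm h2, Ne.symm h3]

-- ===== VERDICT (by name: the statement is the Claim_ definition above) =====
theorem get_note_spec : Claim_equal_get_note := by
  intro s _ hpre
  unfold Spec_get_note
  rcases hs : s.toList with _ | ⟨c, rest⟩
  · exfalso; unfold Pre_get_note at hpre; rw [hs] at hpre; simp at hpre
  · have hc : c ∈ ['A','B','C','D','E','F','G'] := by
      unfold Pre_get_note at hpre; rw [hs] at hpre; simpa using hpre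
    have hseq : s = String.ofList (c :: rest) := by
      have := congrArg String.ofList hs
      rwa [String.ofList_toList] at this
    rw [hseq]
    rcases rest with _ | ⟨d, r⟩
    · exact eq_single c hc
    · exact eq_cons2 c d r hc
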